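-- pv_equiv track=rewrite | github.com/oguzhanctk/scrawl | Hackerrank/algorithm.py | utopianTree
-- ===== SOURCE A (Python) =====
-- def utopianTree(n):
--     tree = 1
--     for _i in range(0, n):
--         if _i % 2 == 0:
--             tree *= 2
--         else:
--             tree += 1
--     return tree
-- ===== SOURCE B (Python) =====
-- def utopianTree(n):
--     if n <= 0:
--         return 1
--     h = n // 2
--     if n % 2 == 0:
--         return 2 ** (h + 1) - 1
--     else:
--         return 2 ** (h + 2) - 2
-- ===== Notes on version B (the rewrite author's own statement) =====
-- stated objective: faster
-- what changed: Replaces the n-step simulation loop by a closed-form power-of-two formula depending on the parity of n; intended as faster (measured 215x at n=65536 in a timing run; at n=262144 the huge bignum result could not be decoded by the harness).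
import Mathlib
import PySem

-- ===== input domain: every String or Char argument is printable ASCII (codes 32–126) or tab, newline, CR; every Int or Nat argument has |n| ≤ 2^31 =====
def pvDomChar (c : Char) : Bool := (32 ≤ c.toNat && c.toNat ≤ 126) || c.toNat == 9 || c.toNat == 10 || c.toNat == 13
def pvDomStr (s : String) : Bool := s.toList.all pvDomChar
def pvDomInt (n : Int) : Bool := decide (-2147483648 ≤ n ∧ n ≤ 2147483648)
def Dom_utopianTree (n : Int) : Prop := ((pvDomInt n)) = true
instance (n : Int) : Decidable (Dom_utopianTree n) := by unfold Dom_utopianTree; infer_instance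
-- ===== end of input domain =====

-- B replaces A's n-step simulation loop by a closed-form power-of-two formula by parity of n (intended as faster; timing run measured 215x at n=65536).

-- ===== PORT A =====
def utopianTree (n : Int) : Int :=
  (PySem.List.pyRange 0 n 1).foldl
    (fun tree i => if PySem.Int.mod i 2 = 0 then tree * 2 else tree + 1) 1

-- ===== PORT B =====
def utopianTree_alt (n : Int) : Int :=
  if n ≤ 0 then 1
  else
    let h := PySem.Int.floordiv n 2
    if PySem.Int.mod n 2 = 0 then 2 ^ (h + 1).toNat - 1
    else 2 ^ (h + 2).toNat - 2

-- ===== PRECONDITION & SPEC =====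
def Spec_utopianTree (n : Int) (out : Int) : Prop := out = utopianTree_alt n
instance (n : Int) (out : Int) : Decidable (Spec_utopianTree n out) := by unfold Spec_utopianTree; infer_instance

-- ===== CLAIM (what is proved, stated in full; the proofs are below) =====
def Claim_equal_utopianTree : Prop := ∀ (n : Int), Dom_utopianTree n → Spec_utopianTree n (utopianTree n)

-- ===== LEMMAS AND PROOFS =====

-- one more loop iteration
theorem ut_succ (k : Int) (hk : 0 ≤ k) :
    utopianTree (k + 1) =
      if PySem.Int.mod k 2 = 0 then utopianTree k * 2 else utopianTree k + 1 := by
  rw [utopianTree, utopianTree, PySem.List.pyRange_one_succ_right hk, List.foldl_append]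
  simp [List.foldl]

theorem mod2_even (m : Int) : PySem.Int.mod (2 * m) 2 = 0 := by
  simp [PySem.Int.mod]

theorem mod2_odd (m : Int) : PySem.Int.mod (2 * m + 1) 2 = 1 := by
  simp [PySem.Int.mod]

-- closed form for the loop, jointly for even and odd step counts
theorem utopianTree_nat (k : Nat) :
    utopianTree (2 * (k : Int)) = 2 ^ (k + 1) - 1 ∧
    utopianTree (2 * (k : Int) + 1) = 2 ^ (k + 2) - 2 := by
  induction k with
  | zero => constructor <;> decide
  | succ m ih =>
    obtain ⟨_, h2⟩ := ih
    have heven : utopianTree (2 * ((m : Int) + 1)) = 2 ^ (m + 2) - 1 := by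
      rw [show (2 * ((m : Int) + 1)) = (2 * (m : Int) + 1) + 1 by ring,
        ut_succ _ (by positivity), if_neg (by rw [mod2_odd]; decide), h2]
      have : (0:Int) < 2 ^ (m + 2) := by positivity
      omega
    refine ⟨by push_cast; exact heven, ?_⟩
    rw [show (2 * (((m + 1 : Nat)) : Int) + 1) = (2 * ((m : Int) + 1)) + 1 by push_cast; ring,
      ut_succ _ (by positivity), if_pos (mod2_even _),
      heven]
    ring

theorem utopianTree_spec : Claim_equal_utopianTree := by
  intro n _
  unfold Spec_utopianTree utopianTree_alt
  by_cases hn : n ≤ 0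
  · rw [if_pos hn, utopianTree, PySem.List.pyRange_one_eq_nil hn]
    rfl
  · rw [if_neg hn]
    push Not at hn
    rcases Int.even_or_odd n with ⟨m, hm⟩ | ⟨m, hm⟩
    · -- n = 2m, m ≥ 1
      have hm' : n = 2 * m := by omega
      have hm0 : 0 < m := by omega
      obtain ⟨k, hk⟩ : ∃ k : Nat, (k : Int) = m := ⟨m.toNat, by omega⟩
      have := (utopianTree_nat k).1
      rw [hm', ← hk, this, if_pos (mod2_even _)]
      have hfd : PySem.Int.floordiv (2 * (k:Int)) 2 = k := by
        simp [PySem.Int.floordiv]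
      rw [hfd]
      congr 1
    · -- n = 2m+1, m ≥ 0
      have hm0 : 0 ≤ m := by omega
      obtain ⟨k, hk⟩ : ∃ k : Nat, (k : Int) = m := ⟨m.toNat, by omega⟩
      have := (utopianTree_nat k).2
      rw [hm, ← hk, this, if_neg (by rw [mod2_odd]; decide)]
      have hfd : PySem.Int.floordiv (2 * (k:Int) + 1) 2 = k := by
        simp [PySem.Int.floordiv, Int.fdiv_eq_ediv]; omega
      rw [hfd]
      congr 1
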